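-- pv_equiv track=rewrite | github.com/FRST-FRYTL/Reddit_Analyzer_2.0 | backend/app/ml/models/content_classifier.py | _auto_label
-- ===== SOURCE A (Python) =====
-- from typing import Dict, List, Optional, Any, Tuple
--
-- def _auto_label(item: Dict[str, Any]) -> str:
--     """Automatically assign a label based on content patterns."""
--     title = (item.get("title", "") or "").lower()
--     url = item.get("url", "") or ""
--
--     # Rule-based auto-labeling
--     if any(word in title for word in ["?", "how", "what", "why", "help me"]):
--         return "question"
--     elif any(word in title for word in ["meme", "funny", "lol", "humor"]):
--         return "meme"
--     elif any(word in title for word in ["breaking", "news", "report"]):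
--         return "news"
--     elif any(word in title for word in ["advice", "suggestions", "help"]):
--         return "advice"
--     elif any(word in title for word in ["story", "happened", "experience"]):
--         return "story"
--     elif (
--         any(domain in url for domain in ["imgur", "i.redd.it"]) or "image" in title
--     ):
--         return "image"
--     elif (
--         any(domain in url for domain in ["youtube", "streamable"])
--         or "video" in title
--     ):
--         return "video"
--     elif url and not url.startswith("https://www.reddit.com"):
--         return "link"
--     elif any(word in title for word in ["discussion", "thoughts", "opinion"]):
--         return "discussion"
--     else:
--         return "discussion"  # Default category
-- ===== SOURCE B (Python) =====
-- # Different strategy: instead of a short-circuit if/elif cascade, collect ALL labels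
-- # whose pattern matches (exhaustive match over flat keyword/domain tables, plus the
-- # external-link rule), then resolve by a fixed precedence list; default "discussion".
--
-- TITLE_KEYWORDS = [
--     ("?", "question"), ("how", "question"), ("what", "question"),
--     ("why", "question"), ("help me", "question"),
--     ("meme", "meme"), ("funny", "meme"), ("lol", "meme"), ("humor", "meme"),
--     ("breaking", "news"), ("news", "news"), ("report", "news"),
--     ("advice", "advice"), ("suggestions", "advice"), ("help", "advice"),
--     ("story", "story"), ("happened", "story"), ("experience", "story"),
--     ("image", "image"), ("video", "video"),
-- ]
--
-- URL_KEYWORDS = [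
--     ("imgur", "image"), ("i.redd.it", "image"),
--     ("youtube", "video"), ("streamable", "video"),
-- ]
--
-- PRECEDENCE = ["question", "meme", "news", "advice", "story", "image", "video", "link"]
--
--
-- def _auto_label(item):
--     title = (item.get("title", "") or "").lower()
--     url = item.get("url", "") or ""
--     matched = [label for kw, label in TITLE_KEYWORDS if kw in title]
--     matched += [label for kw, label in URL_KEYWORDS if kw in url]
--     if url and not url.startswith("https://www.reddit.com"):
--         matched.append("link")
--     return next((label for label in PRECEDENCE if label in matched), "discussion")
-- ===== Notes on version B (the rewrite author's own statement) =====
-- stated objective: alternative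
-- what changed: Replaces the short-circuit if/elif cascade by an exhaustive-match phase (collect every label whose keyword/domain/link pattern fires, from flat data tables) followed by a precedence-resolution phase that returns the highest-precedence matched label, defaulting to 'discussion'.
import Mathlib
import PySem

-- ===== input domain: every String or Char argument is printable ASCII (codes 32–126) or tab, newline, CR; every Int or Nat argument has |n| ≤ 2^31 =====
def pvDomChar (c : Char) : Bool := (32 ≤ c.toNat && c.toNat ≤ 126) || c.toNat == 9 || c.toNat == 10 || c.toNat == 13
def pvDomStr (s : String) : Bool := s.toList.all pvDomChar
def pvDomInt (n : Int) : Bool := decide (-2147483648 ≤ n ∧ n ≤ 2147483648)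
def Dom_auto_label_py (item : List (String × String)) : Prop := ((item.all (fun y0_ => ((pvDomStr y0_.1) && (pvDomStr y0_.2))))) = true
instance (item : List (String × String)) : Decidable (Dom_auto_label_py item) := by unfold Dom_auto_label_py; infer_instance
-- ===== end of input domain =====

-- B replaces A's short-circuit if/elif cascade by exhaustive matching over flat keyword/domain
-- tables followed by precedence resolution (alternative decomposition, same cost).


-- ===== PORT A =====
-- 'x or ""' on a string is the identity (the only falsy str is ""), so the port uses getD directly.
def auto_label_py (item : List (String × String)) : String :=
  let title := PySem.Str.lower (PySem.Dict.getD ⟨item⟩ "title" "")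
  let url := PySem.Dict.getD ⟨item⟩ "url" ""
  if ["?", "how", "what", "why", "help me"].any (fun w => PySem.Str.isIn w title) then
    "question"
  else if ["meme", "funny", "lol", "humor"].any (fun w => PySem.Str.isIn w title) then
    "meme"
  else if ["breaking", "news", "report"].any (fun w => PySem.Str.isIn w title) then
    "news"
  else if ["advice", "suggestions", "help"].any (fun w => PySem.Str.isIn w title) then
    "advice"
  else if ["story", "happened", "experience"].any (fun w => PySem.Str.isIn w title) then
    "story"
  else if (["imgur", "i.redd.it"].any (fun d => PySem.Str.isIn d url)) || PySem.Str.isIn "image" title then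
    "image"
  else if (["youtube", "streamable"].any (fun d => PySem.Str.isIn d url)) || PySem.Str.isIn "video" title then
    "video"
  else if url ≠ "" && !(PySem.Str.startswith url "https://www.reddit.com") then
    "link"
  else if ["discussion", "thoughts", "opinion"].any (fun w => PySem.Str.isIn w title) then
    "discussion"
  else
    "discussion"

-- ===== PORT B =====
def titleKeywords : List (String × String) :=
  [ ("?", "question"), ("how", "question"), ("what", "question"),
    ("why", "question"), ("help me", "question"),
    ("meme", "meme"), ("funny", "meme"), ("lol", "meme"), ("humor", "meme"),
    ("breaking", "news"), ("news", "news"), ("report", "news"),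
    ("advice", "advice"), ("suggestions", "advice"), ("help", "advice"),
    ("story", "story"), ("happened", "story"), ("experience", "story"),
    ("image", "image"), ("video", "video") ]

def urlKeywords : List (String × String) :=
  [ ("imgur", "image"), ("i.redd.it", "image"),
    ("youtube", "video"), ("streamable", "video") ]

def precedence : List String :=
  ["question", "meme", "news", "advice", "story", "image", "video", "link"]

-- every label whose pattern fires (the two comprehensions plus the link rule of Source B)
def matchedList (title url : String) : List String :=
  ((titleKeywords.filter (fun p => PySem.Str.isIn p.1 title)).map Prod.snd
    ++ (urlKeywords.filter (fun p => PySem.Str.isIn p.1 url)).map Prod.snd)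
    ++ (if url ≠ "" && !(PySem.Str.startswith url "https://www.reddit.com") then ["link"] else [])

-- next((label for label in PRECEDENCE if label in matched), "discussion")
def auto_label_py_alt (item : List (String × String)) : String :=
  let title := PySem.Str.lower (PySem.Dict.getD ⟨item⟩ "title" "")
  let url := PySem.Dict.getD ⟨item⟩ "url" ""
  (precedence.find? (fun label => (matchedList title url).contains label)).getD "discussion"

-- ===== PRECONDITION & SPEC =====
def Spec_auto_label_py (item : List (String × String)) (out : String) : Prop := out = auto_label_py_alt item
instance (item : List (String × String)) (out : String) : Decidable (Spec_auto_label_py item out) := by unfold Spec_auto_label_py; infer_instance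

-- ===== CLAIM (what is proved, stated in full; the proofs are below) =====
def Claim_equal_auto_label_py : Prop := ∀ (item : List (String × String)), Dom_auto_label_py item → Spec_auto_label_py item (auto_label_py item)

-- ===== LEMMAS AND PROOFS =====
-- Each label is in matchedList exactly when its branch condition in A holds (stated in A's shape).
theorem matched_question (t u : String) : (matchedList t u).contains "question" =
    (PySem.Str.isIn "?" t || (PySem.Str.isIn "how" t || (PySem.Str.isIn "what" t ||
     (PySem.Str.isIn "why" t || PySem.Str.isIn "help me" t)))) := by
  rw [Bool.eq_iff_iff]; simp [matchedList, titleKeywords, urlKeywords, List.mem_filter]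

theorem matched_meme (t u : String) : (matchedList t u).contains "meme" =
    (PySem.Str.isIn "meme" t || (PySem.Str.isIn "funny" t || (PySem.Str.isIn "lol" t ||
     PySem.Str.isIn "humor" t))) := by
  rw [Bool.eq_iff_iff]; simp [matchedList, titleKeywords, urlKeywords, List.mem_filter]

theorem matched_news (t u : String) : (matchedList t u).contains "news" =
    (PySem.Str.isIn "breaking" t || (PySem.Str.isIn "news" t || PySem.Str.isIn "report" t)) := by
  rw [Bool.eq_iff_iff]; simp [matchedList, titleKeywords, urlKeywords, List.mem_filter]

theorem matched_advice (t u : String) : (matchedList t u).contains "advice" =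
    (PySem.Str.isIn "advice" t || (PySem.Str.isIn "suggestions" t || PySem.Str.isIn "help" t)) := by
  rw [Bool.eq_iff_iff]; simp [matchedList, titleKeywords, urlKeywords, List.mem_filter]

theorem matched_story (t u : String) : (matchedList t u).contains "story" =
    (PySem.Str.isIn "story" t || (PySem.Str.isIn "happened" t || PySem.Str.isIn "experience" t)) := by
  rw [Bool.eq_iff_iff]; simp [matchedList, titleKeywords, urlKeywords, List.mem_filter]

theorem matched_image (t u : String) : (matchedList t u).contains "image" =
    ((PySem.Str.isIn "imgur" u || PySem.Str.isIn "i.redd.it" u) || PySem.Str.isIn "image" t) := by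
  rw [Bool.eq_iff_iff]; simp [matchedList, titleKeywords, urlKeywords, List.mem_filter]; tauto

theorem matched_video (t u : String) : (matchedList t u).contains "video" =
    ((PySem.Str.isIn "youtube" u || PySem.Str.isIn "streamable" u) || PySem.Str.isIn "video" t) := by
  rw [Bool.eq_iff_iff]; simp [matchedList, titleKeywords, urlKeywords, List.mem_filter]; tauto

theorem matched_link (t u : String) : (matchedList t u).contains "link" =
    (u ≠ "" && !(PySem.Str.startswith u "https://www.reddit.com")) := by
  rw [Bool.eq_iff_iff]; simp [matchedList, titleKeywords, urlKeywords, List.mem_filter]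

-- ===== VERDICT (by name: the statement is the Claim_ definition above) =====
theorem auto_label_py_spec : Claim_equal_auto_label_py := by
  intro item _
  unfold Spec_auto_label_py auto_label_py auto_label_py_alt
  generalize PySem.Str.lower (PySem.Dict.getD ⟨item⟩ "title" "") = title
  generalize PySem.Dict.getD ⟨item⟩ "url" "" = url
  simp only [precedence, List.find?_cons, List.find?_nil]
  rw [matched_question, matched_meme, matched_news, matched_advice, matched_story,
    matched_image, matched_video, matched_link]
  simp only [List.any_cons, List.any_nil, Bool.or_false]
  split_ifs <;> simp only [*, Option.getD_some, Option.getD_none]
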